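-- pv_equiv track=rewrite | github.com/cweim/weiming_chatbot | src/processors/pdf_processor.py | _categorize_pdf
-- ===== SOURCE A (Python) =====
-- def _categorize_pdf(file_name: str, content: str) -> str:
--     """Categorize PDF based on filename and content"""
--     file_lower = file_name.lower()
--     content_lower = content.lower()
--
--     # Check for resume/CV first (common patterns)
--     if any(keyword in file_lower for keyword in ['resume', 'cv', 'ming']):
--         return 'resume'
--     elif any(keyword in file_lower for keyword in ['final_report', 'report', 'final_presentation']):
--         return 'project_report'
--     elif any(keyword in file_lower for keyword in ['presentation', 'slide']):
--         return 'presentation'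
--     elif any(keyword in file_lower for keyword in ['proposal', 'plan']):
--         return 'proposal'
--     elif 'team' in file_lower:
--         return 'team_document'
--     else:
--         # Try to infer from content
--         if any(keyword in content_lower for keyword in ['experience', 'education', 'skills', 'objective']):
--             return 'resume'
--         elif any(keyword in content_lower for keyword in ['abstract', 'introduction', 'methodology', 'conclusion']):
--             return 'academic_paper'
--         elif any(keyword in content_lower for keyword in ['agenda', 'meeting', 'minutes']):
--             return 'meeting_document'
--         else:
--             return 'general_document'
-- ===== SOURCE B (Python) =====
-- GROUPS = [
--     (('resume', 'cv', 'ming'), 0, 0),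
--     (('final_report', 'report', 'final_presentation'), 0, 1),
--     (('presentation', 'slide'), 0, 2),
--     (('proposal', 'plan'), 0, 3),
--     (('team',), 0, 4),
--     (('experience', 'education', 'skills', 'objective'), 1, 5),
--     (('abstract', 'introduction', 'methodology', 'conclusion'), 1, 6),
--     (('agenda', 'meeting', 'minutes'), 1, 7),
-- ]
--
-- LABELS = ['resume', 'project_report', 'presentation', 'proposal', 'team_document',
--           'resume', 'academic_paper', 'meeting_document', 'general_document']
--
--
-- def _categorize_pdf(file_name: str, content: str) -> str:
--     texts = (file_name.lower(), content.lower())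
--     hits = [prio for kws, src, prio in GROUPS if any(k in texts[src] for k in kws)]
--     return LABELS[min(hits, default=8)]
-- ===== Notes on version B (the rewrite author's own statement) =====
-- stated objective: alternative
-- what changed: Replaces A's short-circuit if/elif chain (first match returns immediately) with a full scan that collects the priorities of all matching keyword groups into a list and returns the label indexed by the minimum matched priority (default 8 = general_document); first-match precedence becomes a min-reduction over a complete evaluation.
import Mathlib
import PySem

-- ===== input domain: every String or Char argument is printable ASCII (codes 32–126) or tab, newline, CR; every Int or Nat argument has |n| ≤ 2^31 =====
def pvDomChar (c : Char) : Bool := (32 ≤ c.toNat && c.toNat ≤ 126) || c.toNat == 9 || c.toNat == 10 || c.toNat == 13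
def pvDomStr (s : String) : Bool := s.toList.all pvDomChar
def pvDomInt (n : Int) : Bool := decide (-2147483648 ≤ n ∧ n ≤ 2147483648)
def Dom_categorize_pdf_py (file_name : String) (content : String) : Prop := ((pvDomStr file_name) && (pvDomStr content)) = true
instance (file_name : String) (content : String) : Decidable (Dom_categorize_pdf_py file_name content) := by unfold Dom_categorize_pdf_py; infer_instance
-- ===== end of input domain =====

-- B replaces A's short-circuit if/elif chain by a full scan: it collects the priorities of ALL
-- matching keyword groups and returns the label at the MINIMUM matched priority (default 8 =
-- 'general_document'); same cost, different control structure: objective 'alternative'.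

-- ===== PORT A =====
-- literal transliteration of the nested if/elif chain; 'kw in s' is PySem.Str.isIn
def categorize_pdf_py (file_name : String) (content : String) : String :=
  let file_lower := PySem.Str.lower file_name
  let content_lower := PySem.Str.lower content
  if ["resume", "cv", "ming"].any (fun keyword => PySem.Str.isIn keyword file_lower) then
    "resume"
  else if ["final_report", "report", "final_presentation"].any (fun keyword => PySem.Str.isIn keyword file_lower) then
    "project_report"
  else if ["presentation", "slide"].any (fun keyword => PySem.Str.isIn keyword file_lower) then
    "presentation"
  else if ["proposal", "plan"].any (fun keyword => PySem.Str.isIn keyword file_lower) then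
    "proposal"
  else if PySem.Str.isIn "team" file_lower then
    "team_document"
  else
    if ["experience", "education", "skills", "objective"].any (fun keyword => PySem.Str.isIn keyword content_lower) then
      "resume"
    else if ["abstract", "introduction", "methodology", "conclusion"].any (fun keyword => PySem.Str.isIn keyword content_lower) then
      "academic_paper"
    else if ["agenda", "meeting", "minutes"].any (fun keyword => PySem.Str.isIn keyword content_lower) then
      "meeting_document"
    else
      "general_document"

-- ===== PORT B =====
-- Source B's GROUPS: (keywords, source text index 0=filename 1=content, priority)
def pvGroups : List (List String × Nat × Nat) :=
  [ (["resume", "cv", "ming"], 0, 0),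
    (["final_report", "report", "final_presentation"], 0, 1),
    (["presentation", "slide"], 0, 2),
    (["proposal", "plan"], 0, 3),
    (["team"], 0, 4),
    (["experience", "education", "skills", "objective"], 1, 5),
    (["abstract", "introduction", "methodology", "conclusion"], 1, 6),
    (["agenda", "meeting", "minutes"], 1, 7) ]

-- Source B's LABELS
def pvLabels : List String :=
  ["resume", "project_report", "presentation", "proposal", "team_document",
   "resume", "academic_paper", "meeting_document", "general_document"]

-- the list comprehension 'hits'; min(hits, default=8) is foldl min 8 (exact: every hit is < 8);
-- LABELS[...] is getD (exact: the index is always ≤ 8, in range)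
def categorize_pdf_py_alt (file_name : String) (content : String) : String :=
  let fl := PySem.Str.lower file_name
  let cl := PySem.Str.lower content
  let hits := pvGroups.foldr (fun g acc =>
    if g.1.any (fun k => PySem.Str.isIn k (if g.2.1 == 0 then fl else cl)) then g.2.2 :: acc else acc) []
  pvLabels.getD (hits.foldl Nat.min 8) "general_document"

-- ===== PRECONDITION & SPEC =====
def Spec_categorize_pdf_py (file_name : String) (content : String) (out : String) : Prop := out = categorize_pdf_py_alt file_name content
instance (file_name : String) (content : String) (out : String) : Decidable (Spec_categorize_pdf_py file_name content out) := by unfold Spec_categorize_pdf_py; infer_instance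

-- ===== CLAIM (what is proved, stated in full; the proofs are below) =====
def Claim_equal_categorize_pdf_py : Prop := ∀ (file_name : String) (content : String), Dom_categorize_pdf_py file_name content → Spec_categorize_pdf_py file_name content (categorize_pdf_py file_name content)

-- ===== LEMMAS AND PROOFS =====

-- ===== VERDICT (by name: the statement is the Claim_ definition above) =====
theorem categorize_pdf_py_spec : Claim_equal_categorize_pdf_py := by
  intro file_name content _
  unfold Spec_categorize_pdf_py categorize_pdf_py categorize_pdf_py_alt
  simp only [pvGroups, pvLabels, List.foldr, List.any_cons, List.any_nil, Bool.or_false,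
    Nat.reduceBEq, beq_self_eq_true, Bool.false_eq_true, if_true, if_false]
  generalize (PySem.Str.isIn "resume" (PySem.Str.lower file_name) || (PySem.Str.isIn "cv" (PySem.Str.lower file_name) || PySem.Str.isIn "ming" (PySem.Str.lower file_name))) = g0
  generalize (PySem.Str.isIn "final_report" (PySem.Str.lower file_name) || (PySem.Str.isIn "report" (PySem.Str.lower file_name) || PySem.Str.isIn "final_presentation" (PySem.Str.lower file_name))) = g1
  generalize (PySem.Str.isIn "presentation" (PySem.Str.lower file_name) || PySem.Str.isIn "slide" (PySem.Str.lower file_name)) = g2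
  generalize (PySem.Str.isIn "proposal" (PySem.Str.lower file_name) || PySem.Str.isIn "plan" (PySem.Str.lower file_name)) = g3
  generalize (PySem.Str.isIn "team" (PySem.Str.lower file_name)) = g4
  generalize (PySem.Str.isIn "experience" (PySem.Str.lower content) || (PySem.Str.isIn "education" (PySem.Str.lower content) || (PySem.Str.isIn "skills" (PySem.Str.lower content) || PySem.Str.isIn "objective" (PySem.Str.lower content)))) = g5
  generalize (PySem.Str.isIn "abstract" (PySem.Str.lower content) || (PySem.Str.isIn "introduction" (PySem.Str.lower content) || (PySem.Str.isIn "methodology" (PySem.Str.lower content) || PySem.Str.isIn "conclusion" (PySem.Str.lower content)))) = g6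
  generalize (PySem.Str.isIn "agenda" (PySem.Str.lower content) || (PySem.Str.isIn "meeting" (PySem.Str.lower content) || PySem.Str.isIn "minutes" (PySem.Str.lower content))) = g7
  cases g0 <;> cases g1 <;> cases g2 <;> cases g3 <;> cases g4 <;> cases g5 <;> cases g6 <;> cases g7 <;> decide
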